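-- pv_equiv track=rewrite | github.com/benjaortizq/ITCR | Menus31_BenjaminOrtiz.py | potenciaMasCercana
-- ===== SOURCE A (Python) =====
-- def potenciaMasCercana (numero) :
--     numero= int(numero)
--     exponente_diez=0
--     while numero > 10** exponente_diez :
--         exponente_diez+=1
--     potencia_inmediata = 10 ** exponente_diez
--     potencia_anterior = 10 ** ( exponente_diez-1 )
--     if ( numero - potencia_anterior) <= (potencia_inmediata - numero ) :
--         return potencia_anterior
--     return  potencia_inmediata
-- ===== SOURCE B (Python) =====
-- def potenciaMasCercana(numero):
--     # Closed-form exponent from the decimal digit count instead of a counting loop: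
--     # for numero >= 2, len(str(numero-1)) is the smallest e with 10**e >= numero.
--     numero = int(numero)
--     exp = 0 if numero <= 1 else len(str(numero - 1))
--     potencia_inmediata = 10 ** exp
--     potencia_anterior = 10 ** (exp - 1)
--     if (numero - potencia_anterior) <= (potencia_inmediata - numero):
--         return potencia_anterior
--     return potencia_inmediata
-- ===== Notes on version B (the rewrite author's own statement) =====
-- stated objective: simpler
-- what changed: Replaces A's counting while-loop over candidate exponents with a closed-form exponent taken from the decimal digit count len(str(numero-1)), keeping the same two-power comparison tail.
-- outside the precondition, e.g. on potenciaMasCercana(0): A returns 0.1, B returns 0.1; on potenciaMasCercana(-3): A returns 0.1, B returns 0.1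
import Mathlib
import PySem

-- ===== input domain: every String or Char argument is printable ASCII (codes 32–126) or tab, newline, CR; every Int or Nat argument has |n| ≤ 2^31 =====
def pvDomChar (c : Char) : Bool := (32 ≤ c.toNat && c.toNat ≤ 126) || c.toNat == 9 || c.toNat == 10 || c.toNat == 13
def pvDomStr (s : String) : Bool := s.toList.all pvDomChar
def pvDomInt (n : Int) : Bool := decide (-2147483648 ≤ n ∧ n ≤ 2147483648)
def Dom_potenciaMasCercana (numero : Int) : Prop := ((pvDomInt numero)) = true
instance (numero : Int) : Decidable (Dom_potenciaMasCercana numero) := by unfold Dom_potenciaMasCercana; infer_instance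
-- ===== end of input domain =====

-- B replaces A's counting while-loop by a closed-form exponent from the decimal digit count (objective: simpler).

-- ===== PORT A =====
-- the while-loop: increment exponente_diez while numero > 10**exponente_diez
def pvLoopA (numero : Int) (e : Nat) : Nat :=
  if numero > 10 ^ e then pvLoopA numero (e + 1) else e
termination_by (numero - 10 ^ e).toNat
decreasing_by
  have h1 : (1:Int) ≤ 10 ^ e := one_le_pow₀ (by norm_num)
  omega

-- For exponente_diez = 0 Python's potencia_anterior is the float 0.1; the comparison is done
-- scaled by 10 (pa10 = 10 * potencia_anterior, exact in Int); inside Pre_ (numero ≥ 1) the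
-- e = 0 branch that would return the float 0.1 is never taken.
def potenciaMasCercana (numero : Int) : Int :=
  let e := pvLoopA numero 0
  let potencia_inmediata : Int := 10 ^ e
  let pa10 : Int := if e = 0 then 1 else 10 ^ (e - 1) * 10
  if 10 * numero - pa10 ≤ 10 * potencia_inmediata - 10 * numero then pa10 / 10
  else potencia_inmediata

-- ===== PORT B =====
-- closed form: exp = 0 if numero <= 1 else len(str(numero - 1)); same scaled comparison as above
def potenciaMasCercana_alt (numero : Int) : Int :=
  let e : Nat := if numero ≤ 1 then 0 else (PySem.Int.toStr (numero - 1)).length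
  let potencia_inmediata : Int := 10 ^ e
  let pa10 : Int := if e = 0 then 1 else 10 ^ (e - 1) * 10
  if 10 * numero - pa10 ≤ 10 * potencia_inmediata - 10 * numero then pa10 / 10
  else potencia_inmediata

-- ===== PRECONDITION & SPEC =====
-- Pre_ excludes numero ≤ 0, where both programs return the Python float 0.1 (10**-1), which is
-- not a value of the declared int return type.
def Pre_potenciaMasCercana (numero : Int) : Prop := 1 ≤ numero
instance (numero : Int) : Decidable (Pre_potenciaMasCercana numero) := by unfold Pre_potenciaMasCercana; infer_instance
def pvWitness_potenciaMasCercana : Int := 42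

def Spec_potenciaMasCercana (numero : Int) (out : Int) : Prop := out = potenciaMasCercana_alt numero
instance (numero : Int) (out : Int) : Decidable (Spec_potenciaMasCercana numero out) := by unfold Spec_potenciaMasCercana; infer_instance

-- ===== CLAIM (what is proved, stated in full; the proofs are below) =====
def Claim_equal_potenciaMasCercana : Prop := ∀ (numero : Int), Dom_potenciaMasCercana numero → Pre_potenciaMasCercana numero → Spec_potenciaMasCercana numero (potenciaMasCercana numero)

-- ===== LEMMAS AND PROOFS =====

-- A's loop lands on E whenever E is the least exponent with numero ≤ 10^E.
lemma pvLoopA_eq (numero : Int) : ∀ (d e E : Nat), E - e = d → e ≤ E →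
    numero ≤ 10 ^ E → (∀ k, k < E → (10:Int) ^ k < numero) → pvLoopA numero e = E := by
  intro d
  induction d with
  | zero =>
    intro e E hd he hE _
    have heE : e = E := by omega
    subst heE
    rw [pvLoopA, if_neg (by omega)]
  | succ n ih =>
    intro e E hd he hE hmin
    have hlt : (10:Int) ^ e < numero := hmin e (by omega)
    rw [pvLoopA, if_pos (by omega)]
    exact ih (e + 1) E (by omega) (by omega) hE hmin

-- B's digit-count exponent satisfies exactly that least-exponent characterisation.
lemma alt_exp_spec (numero : Int) (_h : 1 ≤ numero) :
    numero ≤ 10 ^ (if numero ≤ 1 then 0 else (PySem.Int.toStr (numero - 1)).length) ∧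
    (∀ k, k < (if numero ≤ 1 then 0 else (PySem.Int.toStr (numero - 1)).length) →
      (10:Int) ^ k < numero) := by
  by_cases h1 : numero ≤ 1
  · simp only [if_pos h1]
    refine ⟨by simpa using h1, by omega⟩
  · simp only [if_neg h1]
    have h2 : 2 ≤ numero := by omega
    have hpos : (0:Int) ≤ numero - 1 := by omega
    have htoStr : PySem.Int.toStr (numero - 1) = String.ofList (Nat.toDigits 10 (numero - 1).toNat) := by
      unfold PySem.Int.toStr PySem.Int.toChars
      rw [if_neg (by omega)]
    set m : Nat := (numero - 1).toNat with hm
    have hlen : (PySem.Int.toStr (numero - 1)).length = (Nat.toDigits 10 m).length := by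
      rw [htoStr]; simp
    set L : Nat := (Nat.toDigits 10 m).length with hL
    have hLpos : 0 < L := Nat.length_toDigits_pos
    have hub : m < 10 ^ L := (Nat.length_toDigits_le_iff (by norm_num) hLpos).mp le_rfl
    constructor
    · rw [hlen]
      have : (m : Int) < (10:Int) ^ L := by
        calc (m : Int) < ((10 ^ L : Nat) : Int) := by exact_mod_cast hub
        _ = (10:Int) ^ L := by push_cast; ring
      omega
    · intro k hk
      rw [hlen] at hk
      rcases Nat.eq_zero_or_pos k with hk0 | hkpos
      · subst hk0; simpa using h2
      · have : ¬ m < 10 ^ k := fun hc => by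
          have := (Nat.length_toDigits_le_iff (b := 10) (n := m) (by norm_num) hkpos).mpr hc
          omega
        have hge : 10 ^ k ≤ m := by omega
        have : ((10 ^ k : Nat) : Int) ≤ (m : Int) := by exact_mod_cast hge
        have h10 : ((10 ^ k : Nat) : Int) = (10:Int) ^ k := by push_cast; ring
        omega

-- the two exponents coincide on Pre_
lemma exp_agree (numero : Int) (h : 1 ≤ numero) :
    pvLoopA numero 0 = (if numero ≤ 1 then 0 else (PySem.Int.toStr (numero - 1)).length) := by
  obtain ⟨hub, hmin⟩ := alt_exp_spec numero h
  exact pvLoopA_eq numero _ 0 _ rfl (Nat.zero_le _) hub hmin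

-- ===== VERDICT (by name: the statement is the Claim_ definition above) =====
theorem potenciaMasCercana_spec : Claim_equal_potenciaMasCercana := by
  intro numero _ hpre
  show potenciaMasCercana numero = potenciaMasCercana_alt numero
  unfold potenciaMasCercana potenciaMasCercana_alt
  rw [exp_agree numero hpre]
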